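-- pv_equiv track=rewrite | github.com/dianachu0209/CMSC141 | 141 HWs/hw4.py | fill_bus
-- ===== SOURCE A (Python) =====
-- def gen_passengers(group_names, group_sizes):
--     """
--     Generates names for passengers and puts all the names in a list.
--
--     Inputs:
--         group_names [list[str]]: names for each group
--         group_sizes [list[int]]: size of each group
--
--     Returns [list]: names of the passengers according to group
--     """
--     assert len(group_names) == len(group_sizes)
--
--     names_of_passengers = []
--     for idx, name_group in (enumerate(group_names)):
--         for n in range(group_sizes[idx]):
--             names_of_passengers.append(group_names[idx]+"-"+str(n+1))
--     return names_of_passengers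
--
-- def fill_bus(group_names, group_sizes, bus_config):
--     """
--     Generate a bus map using a list of group names, group sizes, and the
--     bus configuration.
--
--     Inputs:
--         group_names [list[str]]: list of group names
--         group_sizes [list[int]]: list of group sizes
--         bus_config [tuple[int]]: dimensions of the bus
--
--     Returns [list[str]]: bus map with names and positions
--     """
--
--     bus_map = []
--     num_seats = bus_config[0] * bus_config[1]
--     passenger_list = gen_passengers(group_names, group_sizes)
--     if num_seats > len(passenger_list):
--         for i in range(num_seats - len(passenger_list)):
--             passenger_list.append("Empty")
--     position = 0
--     for n in range(bus_config[0]):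
--         people_list = ",".join(passenger_list[position:position+bus_config[1]])
--         bus_map.append(people_list)
--         position += bus_config[1]
--     return bus_map
-- ===== SOURCE B (Python) =====
-- def fill_bus(group_names, group_sizes, bus_config):
--     rows, cols = bus_config[0], bus_config[1]
--     n = len(group_sizes)
--     g, used = 0, 0
--     bus_map = []
--     for _ in range(rows):
--         row = []
--         for _ in range(cols):
--             while g < n and used >= max(group_sizes[g], 0):
--                 g += 1
--                 used = 0
--             if g < n:
--                 used += 1
--                 row.append(group_names[g] + "-" + str(used))
--             else:
--                 row.append("Empty")
--         bus_map.append(",".join(row))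
--     return bus_map
-- ===== Notes on version B (the rewrite author's own statement) =====
-- stated objective: alternative
-- what changed: B never materializes the passenger list: it streams groups directly into the seat grid with a (group, used) cursor, advancing past exhausted groups and emitting each seat label (or Empty) on the fly, instead of A's build-full-list, pad-with-Empty, then slice-per-row pipeline.
-- intended difference: When rows > 0, cols < 0 and there are more than -cols passengers, A's negative slice bound wraps around and its first row returns all but the last -cols passenger names (other rows empty); B returns a row of zero seats (the empty string) for every row, the intended result for a non-positive column count. — e.g. on fill_bus(["a"], [2], [1, -1]): A returns ["a-1"], B returns [""]
import Mathlib
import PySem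

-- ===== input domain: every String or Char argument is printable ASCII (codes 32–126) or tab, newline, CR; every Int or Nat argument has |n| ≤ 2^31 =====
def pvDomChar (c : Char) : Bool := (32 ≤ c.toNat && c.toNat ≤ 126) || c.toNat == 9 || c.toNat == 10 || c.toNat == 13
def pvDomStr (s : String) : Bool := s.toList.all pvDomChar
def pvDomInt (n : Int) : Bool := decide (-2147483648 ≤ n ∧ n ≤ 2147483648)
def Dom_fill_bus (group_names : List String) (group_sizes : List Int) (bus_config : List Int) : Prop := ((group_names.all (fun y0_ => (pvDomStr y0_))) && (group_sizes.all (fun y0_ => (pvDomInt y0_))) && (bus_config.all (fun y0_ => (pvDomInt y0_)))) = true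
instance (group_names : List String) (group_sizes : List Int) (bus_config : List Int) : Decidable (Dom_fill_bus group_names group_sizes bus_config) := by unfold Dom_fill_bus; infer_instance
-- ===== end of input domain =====

-- B streams groups straight into the seat grid with a (group, used) cursor instead of A's
-- build-full-passenger-list / pad / slice-per-row pipeline (return-value equivalence; neither mutates).


-- ===== PORT A =====
-- the 'assert len(group_names) == len(group_sizes)' is handled by Pre_ (lengths equal); the pyGetD defaults are never reached under Pre_
def gen_passengers (group_names : List String) (group_sizes : List Int) : List String :=
  (PySem.List.enumerate group_names 0).foldl
    (fun names_of_passengers p =>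
      (PySem.List.pyRange 0 (PySem.List.pyGetD group_sizes p.1 0) 1).foldl
        (fun acc n => acc ++ [PySem.List.pyGetD group_names p.1 "" ++ "-" ++ PySem.Int.toStr (n + 1)])
        names_of_passengers)
    []

-- bus_config[0]/bus_config[1] raise IndexError when bus_config has fewer than 2 items: excluded by Pre_ (pyGetD default unreached there)
def fill_bus (group_names : List String) (group_sizes : List Int) (bus_config : List Int) : List String :=
  let num_seats : Int := PySem.List.pyGetD bus_config 0 0 * PySem.List.pyGetD bus_config 1 0
  let passenger_list := gen_passengers group_names group_sizes
  let passenger_list :=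
    if num_seats > (passenger_list.length : Int) then
      (PySem.List.pyRange 0 (num_seats - (passenger_list.length : Int)) 1).foldl
        (fun acc _ => acc ++ ["Empty"]) passenger_list
    else passenger_list
  let res :=
    (PySem.List.pyRange 0 (PySem.List.pyGetD bus_config 0 0) 1).foldl
      (fun (s : List String × Int) _ =>
        (s.1 ++ [PySem.Str.join ","
            (PySem.List.slice passenger_list (some s.2) (some (s.2 + PySem.List.pyGetD bus_config 1 0)))],
         s.2 + PySem.List.pyGetD bus_config 1 0))
      ([], 0)
  res.1

-- ===== PORT B =====
-- the 'while g < n and used >= max(group_sizes[g], 0): g += 1; used = 0' loop (g only increases, so it terminates)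
def fb_advance (group_sizes : List Int) (g : Nat) (used : Int) : Nat × Int :=
  if g < group_sizes.length ∧ max (PySem.List.pyGetD group_sizes (g : Int) 0) 0 ≤ used then
    fb_advance group_sizes (g + 1) 0
  else (g, used)
termination_by group_sizes.length - g
decreasing_by omega

-- one seat: advance the cursor, then emit the next passenger label or "Empty"
def fb_seat (group_names : List String) (group_sizes : List Int) (st : Nat × Int) : (Nat × Int) × String :=
  let a := fb_advance group_sizes st.1 st.2
  if a.1 < group_sizes.length then
    ((a.1, a.2 + 1), PySem.List.pyGetD group_names (a.1 : Int) "" ++ "-" ++ PySem.Int.toStr (a.2 + 1))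
  else (a, "Empty")

def fill_bus_alt (group_names : List String) (group_sizes : List Int) (bus_config : List Int) : List String :=
  let rows : Int := PySem.List.pyGetD bus_config 0 0
  let cols : Int := PySem.List.pyGetD bus_config 1 0
  let res :=
    (PySem.List.pyRange 0 rows 1).foldl
      (fun (s : (Nat × Int) × List String) _ =>
        let inner :=
          (PySem.List.pyRange 0 cols 1).foldl
            (fun (t : (Nat × Int) × List String) _ =>
              let r := fb_seat group_names group_sizes t.1
              (r.1, t.2 ++ [r.2]))
            (s.1, [])
        (inner.1, s.2 ++ [PySem.Str.join "," inner.2]))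
      ((0, 0), [])
  res.2

-- ===== PRECONDITION & SPEC =====
-- A raises AssertionError when the two group lists have different lengths and IndexError when
-- bus_config has fewer than two entries; Pre_ excludes exactly those inputs.
def Pre_fill_bus (group_names : List String) (group_sizes : List Int) (bus_config : List Int) : Prop :=
  group_names.length = group_sizes.length ∧ 2 ≤ bus_config.length
instance (group_names : List String) (group_sizes : List Int) (bus_config : List Int) : Decidable (Pre_fill_bus group_names group_sizes bus_config) := by unfold Pre_fill_bus; infer_instance
def pvWitness_fill_bus : List String × List Int × List Int := (["red", "blue"], [3, 2], [2, 3])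

-- When rows > 0, cols < 0 and more than -cols passengers exist, A's negative slice bound wraps around and
-- its first row carries all but the last -cols passenger names; B returns the empty row for every row,
-- the intended result for a non-positive column count.
def D_fill_bus (group_names : List String) (group_sizes : List Int) (bus_config : List Int) : Prop :=
  0 < PySem.List.pyGetD bus_config 0 0 ∧ PySem.List.pyGetD bus_config 1 0 < 0 ∧
    -(PySem.List.pyGetD bus_config 1 0) < ((group_sizes.map (fun s => max s 0)).sum)
instance (group_names : List String) (group_sizes : List Int) (bus_config : List Int) : Decidable (D_fill_bus group_names group_sizes bus_config) := by unfold D_fill_bus; infer_instance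

def Spec_fill_bus (group_names : List String) (group_sizes : List Int) (bus_config : List Int) (out : List String) : Prop := ¬ D_fill_bus group_names group_sizes bus_config → out = fill_bus_alt group_names group_sizes bus_config
instance (group_names : List String) (group_sizes : List Int) (bus_config : List Int) (out : List String) : Decidable (Spec_fill_bus group_names group_sizes bus_config out) := by unfold Spec_fill_bus; infer_instance

def pvDiffWitness_fill_bus : List String × List Int × List Int := (["a"], [2], [1, -1])
def pvDiffWitnessOut_fill_bus : (List String) × (List String) := (["a-1"], [""])

-- ===== CLAIM (what is proved, stated in full; the proofs are below) =====
def Claim_unchanged_fill_bus : Prop := ∀ (group_names : List String) (group_sizes : List Int) (bus_config : List Int), Dom_fill_bus group_names group_sizes bus_config → Pre_fill_bus group_names group_sizes bus_config → Spec_fill_bus group_names group_sizes bus_config (fill_bus group_names group_sizes bus_config)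
def Claim_changed_fill_bus : Prop := Dom_fill_bus (pvDiffWitness_fill_bus.1) (pvDiffWitness_fill_bus.2.1) (pvDiffWitness_fill_bus.2.2) ∧ Pre_fill_bus (pvDiffWitness_fill_bus.1) (pvDiffWitness_fill_bus.2.1) (pvDiffWitness_fill_bus.2.2) ∧ D_fill_bus (pvDiffWitness_fill_bus.1) (pvDiffWitness_fill_bus.2.1) (pvDiffWitness_fill_bus.2.2) ∧ fill_bus (pvDiffWitness_fill_bus.1) (pvDiffWitness_fill_bus.2.1) (pvDiffWitness_fill_bus.2.2) = pvDiffWitnessOut_fill_bus.1 ∧ fill_bus_alt (pvDiffWitness_fill_bus.1) (pvDiffWitness_fill_bus.2.1) (pvDiffWitness_fill_bus.2.2) = pvDiffWitnessOut_fill_bus.2 ∧ pvDiffWitnessOut_fill_bus.1 ≠ pvDiffWitnessOut_fill_bus.2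

-- ===== LEMMAS AND PROOFS =====

-- ---- A-side characterization (as a map of slices of the padded flat list) ----

-- A's Empty-padding loop is an append of replicated "Empty"
theorem pad_loop_eq (L : List String) (k : Int) :
    (PySem.List.pyRange 0 k 1).foldl (fun acc _ => acc ++ ["Empty"]) L
      = L ++ List.replicate k.toNat "Empty" := by
  rw [PySem.List.foldl_append_singleton_eq_map]
  congr 1
  rw [show (fun (_ : Int) => "Empty") = Function.const Int "Empty" from rfl, List.map_const]
  rw [PySem.List.length_pyRange_one]
  norm_num

-- A's row loop with its position accumulator, as a map over row indices
theorem row_loop_eq (cols : Int) (g : Int → String) :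
    ∀ (l : List Int) (bm : List String) (pos : Int),
      (l.foldl (fun (s : List String × Int) _ => (s.1 ++ [g s.2], s.2 + cols)) (bm, pos)).1
        = bm ++ (List.range l.length).map (fun (i : Nat) => g (pos + (i : Int) * cols)) := by
  intro l
  induction l with
  | nil => intro bm pos; simp
  | cons x t ih =>
    intro bm pos
    rw [List.foldl_cons, ih, List.length_cons, List.range_succ_eq_map, List.map_cons,
      List.map_map, List.append_assoc, List.singleton_append]
    congr 2
    · norm_num
    · apply List.map_congr_left
      intro a _
      simp only [Function.comp_apply, Nat.succ_eq_add_one]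
      push_cast
      ring_nf

-- a window of the Empty-padded list = the same window of the raw list, padded to the window size
theorem slice_padded (L : List String) (m a c : Nat) (h : a + c ≤ L.length + m) :
    ((L ++ List.replicate m "Empty").drop a).take c
      = ((L.drop a).take c) ++ List.replicate (c - ((L.drop a).take c).length) "Empty" := by
  rw [List.drop_append, List.take_append, List.drop_replicate, List.take_replicate]
  congr 1
  simp only [List.length_take, List.length_drop]
  congr 1
  omega

-- B's zip is the indexed traversal A performs, when the two lists have equal length
theorem zip_eq_map_pyRange (gn : List String) (gs : List Int)
    (h : gn.length = gs.length) :
    (PySem.List.pyRange 0 (PySem.List.len gn) 1).map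
        (fun j => (PySem.List.pyGetD gn j "", PySem.List.pyGetD gs j 0))
      = gn.zip gs := by
  apply List.ext_getElem
  · simp [PySem.List.length_pyRange_one, PySem.List.len, h]
  · intro i h1 h2
    simp only [List.getElem_map, PySem.List.getElem_pyRange_one, List.getElem_zip, zero_add]
    have hi : i < gn.length := by
      simpa [PySem.List.length_pyRange_one, PySem.List.len] using h1
    rw [show ((i : Int)) = ((i : Nat) : Int) from rfl]
    rw [PySem.List.pyGetD_natCast, PySem.List.pyGetD_natCast,
      List.getD_eq_getElem _ _ hi, List.getD_eq_getElem _ _ (h ▸ hi)]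

-- the flat passenger list both programs are about
def fbL (gn : List String) (gs : List Int) : List String :=
  (gn.zip gs).flatMap
    (fun p => (PySem.List.pyRange 0 p.2 1).map (fun i => p.1 ++ "-" ++ PySem.Int.toStr (i + 1)))

-- A's passenger generator equals the flat list
theorem gen_eq_flatMap (group_names : List String) (group_sizes : List Int)
    (h : group_names.length = group_sizes.length) :
    gen_passengers group_names group_sizes = fbL group_names group_sizes := by
  unfold gen_passengers fbL
  have step1 := PySem.List.foldl_congr_mem (PySem.List.enumerate group_names 0)
    (fun names_of_passengers p =>
      (PySem.List.pyRange 0 (PySem.List.pyGetD group_sizes p.1 0) 1).foldl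
        (fun acc n => acc ++ [PySem.List.pyGetD group_names p.1 "" ++ "-" ++ PySem.Int.toStr (n + 1)])
        names_of_passengers)
    (fun acc p => acc ++ (PySem.List.pyRange 0 (PySem.List.pyGetD group_sizes p.1 0) 1).map
      (fun n => PySem.List.pyGetD group_names p.1 "" ++ "-" ++ PySem.Int.toStr (n + 1)))
    []
    (fun acc p _ => PySem.List.foldl_append_singleton_eq_map _ _ _)
  rw [step1]
  rw [PySem.List.foldl_append_eq_flatMap, List.nil_append]
  rw [PySem.List.enumerate_eq_map_pyRange group_names "", List.flatMap_map]
  rw [← zip_eq_map_pyRange group_names group_sizes h, List.flatMap_map]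

-- row i of A's padded list is row i of the raw list padded to the column count
theorem row_eq (L : List String) (rows cols : Int) (i : Nat) (hi : i < rows.toNat)
    (P : List String)
    (hP : P = if rows * cols > (L.length : Int) then
        L ++ List.replicate (rows * cols - (L.length : Int)).toNat "Empty" else L) :
    PySem.List.slice P (some ((i : Int) * cols)) (some ((i : Int) * cols + cols))
      = PySem.List.slice L (some ((i : Int) * cols)) (some ((i : Int) * cols + cols))
        ++ List.replicate (cols - ((PySem.List.slice L (some ((i : Int) * cols)) (some ((i : Int) * cols + cols))).length : Int)).toNat "Empty" := by
  have hrows : 0 < rows := by omega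
  by_cases hc : 0 < cols
  · have hib : ((i : Int) + 1) * cols ≤ rows * cols :=
      mul_le_mul_of_nonneg_right (by omega) (le_of_lt hc)
    have ha : (0 : Int) ≤ (i : Int) * cols := by positivity
    have hb : (0 : Int) ≤ (i : Int) * cols + cols := by positivity
    have hslice := PySem.List.slice_toNat L ha hb
    by_cases hpad : rows * cols > (L.length : Int)
    · rw [if_pos hpad] at hP
      rw [hP, PySem.List.slice_toNat _ ha hb, hslice]
      have hle : ((i : Int) * cols).toNat + cols.toNat
          ≤ L.length + (rows * cols - (L.length : Int)).toNat := by
        have : (i : Int) * cols + cols ≤ rows * cols := by nlinarith [hib]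
        omega
      rw [slice_padded L _ _ _ (by omega : ((i:Int)*cols).toNat + (((i : Int) * cols + cols).toNat - ((i:Int)*cols).toNat) ≤ L.length + (rows * cols - (L.length : Int)).toNat)]
      congr 1
      congr 1
      simp only [List.length_take, List.length_drop]
      omega
    · rw [if_neg hpad] at hP
      rw [hP]
      have hlen : ((i : Int) * cols + cols).toNat ≤ L.length := by
        have : (i : Int) * cols + cols ≤ rows * cols := by nlinarith [hib]
        omega
      have : (PySem.List.slice L (some ((i : Int) * cols)) (some ((i : Int) * cols + cols))).length = cols.toNat := by
        rw [hslice]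
        simp only [List.length_take, List.length_drop]
        omega
      rw [this]
      have : (cols - (cols.toNat : Int)).toNat = 0 := by omega
      rw [this, List.replicate_zero, List.append_nil]
  · have hpad : ¬ (rows * cols > (L.length : Int)) := by
      have : rows * cols ≤ 0 := mul_nonpos_of_nonneg_of_nonpos (le_of_lt hrows) (by omega)
      omega
    rw [if_neg hpad] at hP
    rw [hP]
    have : (cols - ((PySem.List.slice L (some ((i : Int) * cols)) (some ((i : Int) * cols + cols))).length : Int)).toNat = 0 := by omega
    rw [this, List.replicate_zero, List.append_nil]

-- ---- B-side characterization (the streaming cursor walks the flat list) ----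

def fbCap (gs : List Int) (j : Nat) : Nat := (gs.getD j 0).toNat
def fbName (gn : List String) (j : Nat) : String := gn.getD j ""
def fbSeg (gn : List String) (gs : List Int) (j : Nat) : List String :=
  (List.range (fbCap gs j)).map (fun (i : Nat) => fbName gn j ++ "-" ++ PySem.Int.toStr ((i : Int) + 1))
def fbPre (gs : List Int) (g : Nat) : Nat := ((List.range g).map (fbCap gs)).sum
def fbPos (gs : List Int) (st : Nat × Int) : Nat := fbPre gs st.1 + st.2.toNat
def fbValid (gs : List Int) (st : Nat × Int) : Prop :=
  st.1 ≤ gs.length ∧ 0 ≤ st.2 ∧ st.2.toNat ≤ fbCap gs st.1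

-- the window of m seats starting at flat position p: passengers then Empty padding
def fbWindow (gn : List String) (gs : List Int) (p m : Nat) : List String :=
  (((fbL gn gs).drop p).take m) ++ List.replicate (m - ((fbL gn gs).length - p)) "Empty"

theorem fbL_eq_flat (gn : List String) (gs : List Int) (h : gn.length = gs.length) :
    fbL gn gs = (List.range gs.length).flatMap (fbSeg gn gs) := by
  unfold fbL
  rw [← zip_eq_map_pyRange gn gs h, List.flatMap_map, PySem.List.pyRange_one, List.flatMap_map,
    List.flatMap_def, List.flatMap_def]
  congr 1
  have hlen : ((PySem.List.len gn - 0).toNat) = gs.length := by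
    simp [PySem.List.len, h]
  rw [hlen]
  apply List.map_congr_left
  intro j hj
  rw [List.mem_range] at hj
  simp only [zero_add, PySem.List.pyGetD_natCast, fbSeg, fbCap, fbName]
  rw [PySem.List.pyRange_one]
  simp only [Int.sub_zero]
  rw [List.map_map]
  apply List.map_congr_left
  intro i _
  simp

theorem fbL_length (gn : List String) (gs : List Int) (h : gn.length = gs.length) :
    (fbL gn gs).length = fbPre gs gs.length := by
  rw [fbL_eq_flat gn gs h, List.length_flatMap]
  unfold fbPre
  congr 1
  apply List.map_congr_left
  intro j _
  simp [fbSeg]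

theorem sum_max_eq_len (gn : List String) (gs : List Int) (h : gn.length = gs.length) :
    ((gs.map (fun s => max s 0)).sum) = ((fbL gn gs).length : Int) := by
  rw [fbL_length gn gs h]
  have h1 : ∀ l : List Int, ((l.map (fun s => max s 0)).sum) = (((l.map Int.toNat).sum : Nat) : Int) := by
    intro l
    induction l with
    | nil => simp
    | cons x t ih =>
      simp only [List.map_cons, List.sum_cons, ih]
      push_cast [Int.toNat_eq_max]
      ring
  rw [h1]
  congr 1
  unfold fbPre
  have h2 : (List.range gs.length).map (fbCap gs) = gs.map Int.toNat := by
    apply List.ext_getElem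
    · simp
    · intro i h1' h2'
      have hi : i < gs.length := by simpa using h1'
      simp [fbCap, List.getD_eq_getElem?_getD, List.getElem?_eq_getElem hi]
  rw [h2]

theorem fbPre_succ (gs : List Int) (g : Nat) : fbPre gs (g + 1) = fbPre gs g + fbCap gs g := by
  unfold fbPre
  rw [List.range_succ, List.map_append, List.sum_append]
  simp

theorem fbPre_mono (gs : List Int) {a b : Nat} (hab : a ≤ b) : fbPre gs a ≤ fbPre gs b := by
  induction hab with
  | refl => exact le_refl _
  | step h ih => exact ih.trans (by rw [fbPre_succ]; omega)

theorem drop_flat (gn : List String) (gs : List Int) (h : gn.length = gs.length) :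
    ∀ g, g ≤ gs.length →
      (fbL gn gs).drop (fbPre gs g)
        = (List.range (gs.length - g)).flatMap (fun k => fbSeg gn gs (g + k)) := by
  intro g
  induction g with
  | zero =>
    intro _
    have h0 : fbPre gs 0 = 0 := by simp [fbPre]
    rw [h0, List.drop_zero, Nat.sub_zero, fbL_eq_flat gn gs h]
    congr 1
    funext k
    rw [Nat.zero_add]
  | succ g ih =>
    intro hg
    rw [fbPre_succ, ← List.drop_drop, ih (by omega)]
    have hsplit : gs.length - g = (gs.length - (g + 1)) + 1 := by omega
    rw [hsplit, List.range_succ_eq_map, List.flatMap_cons, Nat.add_zero]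
    have hlen : (fbSeg gn gs g).length = fbCap gs g := by simp [fbSeg]
    rw [← hlen, List.drop_left, List.flatMap_map]
    congr 1
    funext k
    simp only [Function.comp_apply, Nat.succ_eq_add_one]
    congr 1
    omega

theorem pos_le_total (gs : List Int) (gn : List String) (h : gn.length = gs.length)
    (st : Nat × Int) (hv : fbValid gs st) : fbPos gs st ≤ (fbL gn gs).length := by
  obtain ⟨hg, hu, hcap⟩ := hv
  rw [fbL_length gn gs h]
  rcases Nat.lt_or_ge st.1 gs.length with hlt | hge
  · have : fbPos gs st ≤ fbPre gs (st.1 + 1) := by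
      rw [fbPre_succ]; unfold fbPos; omega
    exact this.trans (fbPre_mono gs (by omega))
  · have heq : st.1 = gs.length := le_antisymm hg hge
    have hcap0 : fbCap gs st.1 = 0 := by
      unfold fbCap
      rw [List.getD_eq_default _ _ (by omega)]
      rfl
    unfold fbPos
    rw [heq]
    omega

theorem cap_out (gs : List Int) (g : Nat) (hg : gs.length ≤ g) : fbCap gs g = 0 := by
  unfold fbCap
  rw [List.getD_eq_default _ _ hg]
  rfl

theorem advance_spec (gs : List Int) :
    ∀ g (u : Int), g ≤ gs.length → 0 ≤ u → u.toNat ≤ fbCap gs g →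
      (fb_advance gs g u).1 ≤ gs.length ∧ 0 ≤ (fb_advance gs g u).2 ∧
        (fb_advance gs g u).2.toNat ≤ fbCap gs (fb_advance gs g u).1 ∧
        fbPre gs (fb_advance gs g u).1 + (fb_advance gs g u).2.toNat = fbPre gs g + u.toNat ∧
        (((fb_advance gs g u).1 < gs.length ∧ (fb_advance gs g u).2.toNat < fbCap gs (fb_advance gs g u).1)
          ∨ ((fb_advance gs g u).1 = gs.length ∧ (fb_advance gs g u).2 = 0)) := by
  have aux : ∀ (k g : Nat) (u : Int), gs.length - g ≤ k → g ≤ gs.length → 0 ≤ u → u.toNat ≤ fbCap gs g →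
      (fb_advance gs g u).1 ≤ gs.length ∧ 0 ≤ (fb_advance gs g u).2 ∧
        (fb_advance gs g u).2.toNat ≤ fbCap gs (fb_advance gs g u).1 ∧
        fbPre gs (fb_advance gs g u).1 + (fb_advance gs g u).2.toNat = fbPre gs g + u.toNat ∧
        (((fb_advance gs g u).1 < gs.length ∧ (fb_advance gs g u).2.toNat < fbCap gs (fb_advance gs g u).1)
          ∨ ((fb_advance gs g u).1 = gs.length ∧ (fb_advance gs g u).2 = 0)) := by
    intro k
    induction k with
    | zero =>
      intro g u hk hg hu hcap
      have hge : g = gs.length := by omega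
      rw [fb_advance, if_neg (by intro hc; omega)]
      exact ⟨hg, hu, hcap, rfl, Or.inr ⟨hge, by
        show u = 0
        have := cap_out gs g (by omega)
        omega⟩⟩
    | succ k ih =>
      intro g u hk hg hu hcap
      rw [fb_advance]
      by_cases hcond : g < gs.length ∧ max (PySem.List.pyGetD gs (g : Int) 0) 0 ≤ u
      · rw [if_pos hcond]
        have hx : PySem.List.pyGetD gs ((g : Nat) : Int) 0 = gs.getD g 0 :=
          PySem.List.pyGetD_natCast gs g 0
        have hcap_le : fbCap gs g ≤ u.toNat := by
          have h2 := hcond.2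
          rw [hx, max_le_iff] at h2
          unfold fbCap
          omega
        obtain ⟨a1, a2, a3, a4, a5⟩ := ih (g + 1) 0 (by omega) (by omega) (by omega) (by simp)
        refine ⟨a1, a2, a3, ?_, a5⟩
        rw [a4, fbPre_succ]
        have : u.toNat = fbCap gs g := by omega
        omega
      · rw [if_neg hcond]
        refine ⟨hg, hu, hcap, rfl, ?_⟩
        rcases Nat.lt_or_ge g gs.length with hlt | hge2
        · left
          refine ⟨hlt, ?_⟩
          show u.toNat < fbCap gs g
          have hx : PySem.List.pyGetD gs ((g : Nat) : Int) 0 = gs.getD g 0 :=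
            PySem.List.pyGetD_natCast gs g 0
          have hmu : u < max (gs.getD g 0) 0 := by
            by_contra hmx
            exact hcond ⟨hlt, by rw [hx]; omega⟩
          have hx0 : 0 < gs.getD g 0 := by
            by_cases h0 : gs.getD g 0 ≤ 0
            · rw [max_eq_right h0] at hmu; omega
            · omega
          rw [max_eq_left (le_of_lt hx0)] at hmu
          unfold fbCap
          omega
        · right
          have hge' : g = gs.length := by omega
          exact ⟨hge', by
            show u = 0
            have := cap_out gs g (by omega)
            omega⟩
  intro g u hg hu hcap
  exact aux (gs.length - g) g u (le_refl _) hg hu hcap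

theorem window_zero (gn : List String) (gs : List Int) (p : Nat) : fbWindow gn gs p 0 = [] := by
  unfold fbWindow
  simp

theorem window_succ (gn : List String) (gs : List Int) (p m : Nat) (hp : p ≤ (fbL gn gs).length) :
    fbWindow gn gs p (m + 1)
      = fbWindow gn gs p 1 ++ fbWindow gn gs (min (p + 1) (fbL gn gs).length) m := by
  unfold fbWindow
  rcases Nat.lt_or_ge p (fbL gn gs).length with hlt | hge
  · have hmin : min (p + 1) (fbL gn gs).length = p + 1 := by omega
    rw [hmin, List.drop_eq_getElem_cons hlt, List.take_succ_cons, List.take_succ_cons,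
      List.take_zero]
    have c1 : 1 - ((fbL gn gs).length - p) = 0 := by omega
    have c2 : m + 1 - ((fbL gn gs).length - p) = m - ((fbL gn gs).length - (p + 1)) := by omega
    rw [c1, c2, List.replicate_zero]
    simp
  · have hp' : p = (fbL gn gs).length := by omega
    have hmin : min (p + 1) (fbL gn gs).length = p := by omega
    rw [hmin, List.drop_eq_nil_of_le (by omega)]
    have c0 : (fbL gn gs).length - p = 0 := by omega
    rw [c0]
    simp [List.replicate_succ]

theorem seat_spec (gn : List String) (gs : List Int) (h : gn.length = gs.length)
    (st : Nat × Int) (hv : fbValid gs st) :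
    fbValid gs (fb_seat gn gs st).1 ∧
      fbPos gs (fb_seat gn gs st).1 = min (fbPos gs st + 1) (fbL gn gs).length ∧
      fbWindow gn gs (fbPos gs st) 1 = [(fb_seat gn gs st).2] := by
  obtain ⟨hg, hu, hcap⟩ := hv
  obtain ⟨a1, a2, a3, a4, a5⟩ := advance_spec gs st.1 st.2 hg hu hcap
  have hT := fbL_length gn gs h
  have hpos0 : fbPos gs st = fbPre gs st.1 + st.2.toNat := rfl
  simp only [fb_seat]
  set A := fb_advance gs st.1 st.2 with hA
  rcases a5 with ⟨hlt, hcl⟩ | ⟨heq, hzero⟩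
  · rw [if_pos hlt]
    have hpos : fbPos gs st = fbPre gs A.1 + A.2.toNat := by omega
    have hposlt : fbPos gs st < (fbL gn gs).length := by
      rw [hT, hpos]
      have h1 : fbPre gs A.1 + A.2.toNat < fbPre gs (A.1 + 1) := by rw [fbPre_succ]; omega
      exact h1.trans_le (fbPre_mono gs (by omega))
    refine ⟨⟨le_of_lt hlt, by show (0:Int) ≤ A.2 + 1; omega, by show (A.2 + 1).toNat ≤ fbCap gs A.1; omega⟩, ?_, ?_⟩
    · show fbPre gs A.1 + (A.2 + 1).toNat = min (fbPos gs st + 1) (fbL gn gs).length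
      omega
    · unfold fbWindow
      have hrep : 1 - ((fbL gn gs).length - fbPos gs st) = 0 := by omega
      rw [hrep, List.replicate_zero, List.append_nil, List.take_one, List.head?_drop]
      have hcl' : A.2.toNat < fbCap gs A.1 := hcl
      have hkey : (fbL gn gs)[fbPos gs st]?
          = some (fbName gn A.1 ++ "-" ++ PySem.Int.toStr ((A.2.toNat : Int) + 1)) := by
        rw [hpos, ← List.getElem?_drop, drop_flat gn gs h A.1 (le_of_lt hlt)]
        have hsplit : gs.length - A.1 = (gs.length - (A.1 + 1)) + 1 := by omega
        rw [hsplit, List.range_succ_eq_map, List.flatMap_cons, Nat.add_zero]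
        have hlen_seg : A.2.toNat < (fbSeg gn gs A.1).length := by
          simpa [fbSeg] using hcl'
        rw [List.getElem?_append_left hlen_seg]
        unfold fbSeg
        rw [List.getElem?_map, List.getElem?_range hcl']
        rfl
      rw [hkey]
      have hcast : ((A.2.toNat : Int)) = A.2 := Int.toNat_of_nonneg a2
      show [fbName gn A.1 ++ "-" ++ PySem.Int.toStr ((A.2.toNat : Int) + 1)]
        = [PySem.List.pyGetD gn (A.1 : Int) "" ++ "-" ++ PySem.Int.toStr (A.2 + 1)]
      rw [hcast, PySem.List.pyGetD_natCast]
      rfl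
  · rw [if_neg (by omega)]
    have hpos : fbPos gs st = (fbL gn gs).length := by
      rw [hT]
      have h5 : fbPre gs A.1 + A.2.toNat = fbPre gs gs.length := by
        rw [heq, hzero]; simp
      omega
    refine ⟨⟨a1, a2, a3⟩, ?_, ?_⟩
    · show fbPre gs A.1 + A.2.toNat = min (fbPos gs st + 1) (fbL gn gs).length
      have h5 : fbPre gs A.1 + A.2.toNat = fbPre gs gs.length := by
        rw [heq, hzero]; simp
      omega
    · unfold fbWindow
      rw [hpos, List.drop_eq_nil_of_le (le_refl _), List.take_nil]
      simp

theorem inner_spec (gn : List String) (gs : List Int) (h : gn.length = gs.length) :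
    ∀ (l : List Int) (st : Nat × Int) (acc : List String), fbValid gs st →
      fbValid gs (l.foldl (fun (t : (Nat × Int) × List String) _ =>
          ((fb_seat gn gs t.1).1, t.2 ++ [(fb_seat gn gs t.1).2])) (st, acc)).1 ∧
      fbPos gs (l.foldl (fun (t : (Nat × Int) × List String) _ =>
          ((fb_seat gn gs t.1).1, t.2 ++ [(fb_seat gn gs t.1).2])) (st, acc)).1
        = min (fbPos gs st + l.length) (fbL gn gs).length ∧
      (l.foldl (fun (t : (Nat × Int) × List String) _ =>
          ((fb_seat gn gs t.1).1, t.2 ++ [(fb_seat gn gs t.1).2])) (st, acc)).2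
        = acc ++ fbWindow gn gs (fbPos gs st) l.length := by
  intro l
  induction l with
  | nil =>
    intro st acc hv
    have := pos_le_total gs gn h st hv
    refine ⟨hv, by simp; omega, ?_⟩
    rw [List.length_nil, window_zero, List.append_nil, List.foldl_nil]
  | cons x t ih =>
    intro st acc hv
    simp only [List.foldl_cons, List.length_cons]
    obtain ⟨v1, v2, v3⟩ := seat_spec gn gs h st hv
    obtain ⟨i1, i2, i3⟩ := ih (fb_seat gn gs st).1 (acc ++ [(fb_seat gn gs st).2]) v1
    have hple := pos_le_total gs gn h st hv
    refine ⟨i1, ?_, ?_⟩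
    · rw [i2, v2]
      omega
    · rw [i3, v2, window_succ gn gs (fbPos gs st) t.length hple, ← v3]
      rw [List.append_assoc]

theorem outer_spec (gn : List String) (gs : List Int) (cols : Int) (h : gn.length = gs.length) :
    ∀ (l : List Int) (st : Nat × Int) (acc : List String), fbValid gs st →
      (l.foldl (fun (s : (Nat × Int) × List String) _ =>
          (((PySem.List.pyRange 0 cols 1).foldl (fun (t : (Nat × Int) × List String) _ =>
              ((fb_seat gn gs t.1).1, t.2 ++ [(fb_seat gn gs t.1).2])) (s.1, [])).1,
           s.2 ++ [PySem.Str.join "," ((PySem.List.pyRange 0 cols 1).foldl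
              (fun (t : (Nat × Int) × List String) _ =>
                ((fb_seat gn gs t.1).1, t.2 ++ [(fb_seat gn gs t.1).2])) (s.1, [])).2])) (st, acc)).2
        = acc ++ (List.range l.length).map (fun r =>
            PySem.Str.join "," (fbWindow gn gs (min (fbPos gs st + r * cols.toNat) (fbL gn gs).length) cols.toNat)) := by
  intro l
  induction l with
  | nil => intro st acc _; simp
  | cons x t ih =>
    intro st acc hv
    simp only [List.foldl_cons, List.length_cons]
    obtain ⟨i1, i2, i3⟩ := inner_spec gn gs h (PySem.List.pyRange 0 cols 1) st [] hv
    have hlen : (PySem.List.pyRange 0 cols 1).length = cols.toNat := by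
      rw [PySem.List.length_pyRange_one]
      simp
    rw [hlen] at i2 i3
    rw [List.nil_append] at i3
    have hple := pos_le_total gs gn h st hv
    rw [ih _ _ i1, i3, List.range_succ_eq_map, List.map_cons, List.map_map]
    have hhead : min (fbPos gs st + 0 * cols.toNat) (fbL gn gs).length = fbPos gs st := by
      simp only [Nat.zero_mul, Nat.add_zero]
      omega
    rw [hhead, List.append_assoc, List.singleton_append]
    congr 1
    congr 1
    apply List.map_congr_left
    intro r _
    simp only [Function.comp_apply, Nat.succ_eq_add_one]
    rw [i2]
    have heq : min (min (fbPos gs st + cols.toNat) (fbL gn gs).length + r * cols.toNat) (fbL gn gs).length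
        = min (fbPos gs st + (r + 1) * cols.toNat) (fbL gn gs).length := by
      have hm : (r + 1) * cols.toNat = r * cols.toNat + cols.toNat := by ring
      omega
    rw [heq]

-- per-row reconciliation: B's window is A's (possibly padded) slice
theorem window_eq_slice (gn : List String) (gs : List Int) (cols : Int) (r : Nat)
    (hneg : cols < 0 → ((fbL gn gs).length : Int) + cols ≤ 0) :
    fbWindow gn gs (min (r * cols.toNat) (fbL gn gs).length) cols.toNat
      = PySem.List.slice (fbL gn gs) (some ((r : Int) * cols)) (some ((r : Int) * cols + cols))
        ++ List.replicate ((cols - ((PySem.List.slice (fbL gn gs) (some ((r : Int) * cols)) (some ((r : Int) * cols + cols))).length : Int)).toNat) "Empty" := by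
  rcases lt_trichotomy cols 0 with hc | hc | hc
  · -- cols < 0: zero seats per row in B; A's slice is empty because all passengers fit in -cols
    have hT := hneg hc
    have hrneg : (r : Int) * cols ≤ 0 := mul_nonpos_of_nonneg_of_nonpos (by positivity) (le_of_lt hc)
    have hc0 : cols.toNat = 0 := by omega
    rw [hc0, window_zero]
    have hstop : PySem.List.clampIdx (fbL gn gs).length ((r : Int) * cols + cols) = 0 := by
      have hstopneg : (r : Int) * cols + cols < 0 := by omega
      have hk : (r : Int) * cols + cols = -(((-((r : Int) * cols + cols)).toNat : Int)) := by omega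
      rw [hk, PySem.List.clampIdx_neg_natCast _ _ (by omega)]
      have hTk : ((fbL gn gs).length : Int) ≤ -((r : Int) * cols + cols) := by omega
      omega
    have hlen0 : (PySem.List.slice (fbL gn gs) (some ((r : Int) * cols)) (some ((r : Int) * cols + cols))).length = 0 := by
      rw [PySem.List.length_slice, hstop]
      omega
    rw [List.eq_nil_of_length_eq_zero hlen0]
    have hcnt : ((cols - ((([] : List String)).length : Int)).toNat) = 0 := by
      simp
      omega
    rw [hcnt]
    simp
  · -- cols = 0
    subst hc
    have h0 : ((r : Int) * 0) = ((0 : Nat) : Int) := by simp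
    rw [Int.toNat_zero, window_zero, h0]
    rw [show ((0 : Nat) : Int) + 0 = ((0 : Nat) : Int) by simp, PySem.List.slice_natCast]
    simp
  · -- 0 < cols
    obtain ⟨c, rfl⟩ := Int.eq_ofNat_of_zero_le (le_of_lt hc)
    simp only [Int.toNat_natCast]
    have hb1 : (r : Int) * (c : Int) = ((r * c : Nat) : Int) := by push_cast; ring
    rw [hb1, PySem.List.slice_natCast_add]
    unfold fbWindow
    by_cases hrT : r * c ≤ (fbL gn gs).length
    · rw [min_eq_left hrT]
      congr 1
      congr 1
      simp only [List.length_take, List.length_drop]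
      omega
    · have hmin : min (r * c) (fbL gn gs).length = (fbL gn gs).length := by omega
      rw [hmin, List.drop_length, List.drop_eq_nil_of_le (by omega), List.take_nil,
        List.nil_append]
      simp only [List.length_nil]
      congr 1
      omega

theorem fill_bus_eq_alt (group_names : List String) (group_sizes : List Int) (bus_config : List Int)
    (hlen : group_names.length = group_sizes.length)
    (hnd : ¬ D_fill_bus group_names group_sizes bus_config) :
    fill_bus group_names group_sizes bus_config = fill_bus_alt group_names group_sizes bus_config := by
  unfold D_fill_bus at hnd
  simp only [fill_bus, fill_bus_alt]
  set rows := PySem.List.pyGetD bus_config 0 0 with hrows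
  set cols := PySem.List.pyGetD bus_config 1 0 with hcols
  rw [gen_eq_flatMap _ _ hlen]
  set L := fbL group_names group_sizes with hLdef
  set P := if rows * cols > (L.length : Int) then
      (PySem.List.pyRange 0 (rows * cols - (L.length : Int)) 1).foldl
        (fun acc _ => acc ++ ["Empty"]) L
    else L with hP
  have hP' : P = if rows * cols > (L.length : Int) then
      L ++ List.replicate (rows * cols - (L.length : Int)).toNat "Empty" else L := by
    rw [hP]
    split_ifs with h0
    · exact pad_loop_eq L _
    · rfl
  rw [row_loop_eq cols
    (fun pos => PySem.Str.join "," (PySem.List.slice P (some pos) (some (pos + cols))))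
    (PySem.List.pyRange 0 rows 1) [] 0]
  have hvalid0 : fbValid group_sizes (0, 0) := ⟨Nat.zero_le _, le_refl 0, Nat.zero_le _⟩
  rw [outer_spec group_names group_sizes cols hlen (PySem.List.pyRange 0 rows 1) (0, 0) [] hvalid0]
  rw [List.nil_append, List.nil_append, PySem.List.length_pyRange_one]
  have hpos0 : fbPos group_sizes (0, 0) = 0 := by simp [fbPos, fbPre]
  apply List.map_congr_left
  intro i hi
  rw [List.mem_range] at hi
  have hi' : i < rows.toNat := by omega
  have hrowpos : 0 < rows := by omega
  congr 1
  rw [hpos0]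
  simp only [zero_add]
  rw [row_eq L rows cols i hi' P hP', window_eq_slice group_names group_sizes cols i ?side]
  case side =>
    intro hcneg
    have hsum : ¬ (-cols < ((group_sizes.map (fun s => max s 0)).sum)) := by
      intro hlt
      exact hnd ⟨hrowpos, hcneg, hlt⟩
    have hs2 := sum_max_eq_len group_names group_sizes hlen
    omega

-- ===== VERDICT (by name: the statements are the Claim_ definitions above) =====
theorem fill_bus_spec : Claim_unchanged_fill_bus :=
  fun group_names group_sizes bus_config _ hpre hnd =>
    fill_bus_eq_alt group_names group_sizes bus_config hpre.1 hnd

theorem fill_bus_changed : Claim_changed_fill_bus := by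
  unfold Claim_changed_fill_bus
  decide
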